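-- pv_equiv track=rewrite | github.com/wilmurillo-ai/Design-Assistant | .skills/openclaw-skills/skills/murongg/ui-element-ops/scripts/operate_ui.py | expand_csv
-- ===== SOURCE A (Python) =====
-- from typing import Any, Dict, List, Optional, Sequence, Tuple
--
-- def expand_csv(values: Optional[Sequence[str]]) -> List[str]:
--     out: List[str] = []
--     if not values:
--         return out
--     for v in values:
--         if v is None:
--             continue
--         for piece in str(v).split(","):
--             p = piece.strip()
--             if p:
--                 out.append(p)
--     return out
-- ===== SOURCE B (Python) =====
-- from typing import List, Optional, Sequence
--
--
-- def expand_csv(values: Optional[Sequence[str]]) -> List[str]: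
--     # Single character-level scan: no split()/strip() at all.  For each value we
--     # run a small state machine over its characters plus a "," sentinel:
--     # buf holds the current token (leading whitespace never enters it), pend
--     # holds a run of whitespace seen after token text (dropped if it turns out
--     # to be trailing, flushed into buf if more text follows).
--     res: List[str] = []
--     for v in values or ():
--         if v is None:
--             continue
--         buf: List[str] = []
--         pend: List[str] = []
--         for c in str(v) + ",":
--             if c == ",":
--                 if buf:
--                     res.append("".join(buf))
--                 buf = []
--                 pend = []
--             elif c.isspace():
--                 if buf:
--                     pend.append(c)
--             else:
--                 buf.extend(pend)
--                 buf.append(c)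
--                 pend = []
--     return res
-- ===== Notes on version B (the rewrite author's own statement) =====
-- stated objective: alternative
-- what changed: B replaces A's split-then-strip-then-filter pipeline by a single character-level state machine that tokenizes on commas while discarding leading/trailing whitespace on the fly (a pending-whitespace buffer), never calling split or strip.
import Mathlib
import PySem

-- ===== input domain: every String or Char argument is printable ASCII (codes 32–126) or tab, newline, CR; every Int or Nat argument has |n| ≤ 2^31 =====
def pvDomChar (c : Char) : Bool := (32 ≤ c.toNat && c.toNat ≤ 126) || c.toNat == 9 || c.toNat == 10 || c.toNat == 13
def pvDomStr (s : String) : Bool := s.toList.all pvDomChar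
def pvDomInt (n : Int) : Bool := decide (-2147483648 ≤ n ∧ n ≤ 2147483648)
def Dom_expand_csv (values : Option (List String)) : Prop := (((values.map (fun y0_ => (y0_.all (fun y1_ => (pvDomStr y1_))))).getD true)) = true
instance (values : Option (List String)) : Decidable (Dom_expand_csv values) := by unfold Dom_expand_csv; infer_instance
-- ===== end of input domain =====

-- B replaces A's split/strip/filter pipeline by a single character-level state machine
-- tokenizing on commas with a pending-whitespace buffer (objective: alternative algorithm).

-- ===== PORT A =====
-- A: accumulator loop; for each value, split it on ",", strip each piece, append if non-empty.
def expand_csv (values : Option (List String)) : List String :=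
  match values with
  | none => []
  | some vs =>
    if vs = [] then []                    -- 'if not values: return out'
    else
      vs.foldl (fun out v =>
        (PySem.Chars.splitOn v.toList (",".toList)).foldl (fun out piece =>
          let p := PySem.Chars.strip piece
          if p.isEmpty then out else out ++ [String.mk p]) out) []

-- ===== PORT B =====
-- B's per-character transition: state = (result list, current token buf, pending whitespace).
def pvStep (st : List String × List Char × List Char) (c : Char) :
    List String × List Char × List Char :=
  let (res, buf, pend) := st
  if c = ',' then
    (if buf = [] then res else res ++ [String.mk buf], [], [])
  else if PySem.Chars.isspace c then
    (res, buf, if buf = [] then pend else pend ++ [c])   -- 'if buf: pend.append(c)'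
  else
    (res, buf ++ pend ++ [c], [])

-- B: one scan over each value's characters plus a "," sentinel.
def expand_csv_alt (values : Option (List String)) : List String :=
  match values with
  | none => []                            -- 'for v in values or ()' over nothing
  | some vs =>
    vs.foldl (fun res v =>
      ((v.toList ++ [',']).foldl pvStep (res, [], [])).1) []

-- ===== PRECONDITION & SPEC =====
def Spec_expand_csv (values : Option (List String)) (out : List String) : Prop := out = expand_csv_alt values
instance (values : Option (List String)) (out : List String) : Decidable (Spec_expand_csv values out) := by unfold Spec_expand_csv; infer_instance

-- ===== CLAIM (what is proved, stated in full; the proofs are below) =====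
def Claim_equal_expand_csv : Prop := ∀ (values : Option (List String)), Dom_expand_csv values → Spec_expand_csv values (expand_csv values)

-- ===== LEMMAS AND PROOFS =====

def mergeHead (pre : List Char) : List (List Char) → List (List Char)
  | [] => [pre]
  | p :: ps => (pre ++ p) :: ps

-- A simple structural recursion computing s.split(",") (single-char separator).
def splitComma : List Char → List (List Char)
  | [] => [[]]
  | c :: rest => if c = ',' then [] :: splitComma rest else mergeHead [c] (splitComma rest)

theorem splitComma_ne_nil (l : List Char) : splitComma l ≠ [] := by
  cases l with
  | nil => simp [splitComma]
  | cons c rest =>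
    simp only [splitComma]
    split_ifs
    · simp
    · cases h : splitComma rest <;> simp [mergeHead]

theorem mergeHead_nil_of_ne {xs : List (List Char)} (h : xs ≠ []) : mergeHead [] xs = xs := by
  cases xs with
  | nil => exact absurd rfl h
  | cons p ps => simp [mergeHead]

theorem mergeHead_mergeHead (a b : List Char) (xs : List (List Char)) :
    mergeHead a (mergeHead b xs) = mergeHead (a ++ b) xs := by
  cases xs <;> simp [mergeHead]

theorem go_spec (l : List Char) (fuel : Nat) (hf : l.length < fuel) (cur : List Char)
    (acc : List (List Char)) :
    PySem.Chars.splitOn.go [','] fuel l cur acc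
      = acc.reverse ++ mergeHead cur.reverse (splitComma l) := by
  induction l generalizing fuel cur acc with
  | nil =>
    cases fuel with
    | zero => omega
    | succ f =>
      simp [PySem.Chars.splitOn.go, splitComma, mergeHead]
  | cons c rest ih =>
    cases fuel with
    | zero => omega
    | succ f =>
      have hrest : rest.length < f := by simpa using hf
      by_cases hc : c = ','
      · subst hc
        have : PySem.Chars.splitOn.go [','] (f + 1) (',' :: rest) cur acc
            = PySem.Chars.splitOn.go [','] f rest [] (cur.reverse :: acc) := by
          simp [PySem.Chars.splitOn.go, List.isPrefixOf]
        rw [this, ih f hrest]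
        have hne := splitComma_ne_nil rest
        simp only [List.reverse_nil]
        rw [mergeHead_nil_of_ne hne]
        simp [splitComma, mergeHead]
      · have : PySem.Chars.splitOn.go [','] (f + 1) (c :: rest) cur acc
            = PySem.Chars.splitOn.go [','] f rest (c :: cur) acc := by
          simp [PySem.Chars.splitOn.go, List.isPrefixOf, BEq.beq]
          intro h
          exact absurd h.symm hc
        rw [this, ih f hrest]
        simp [splitComma, hc, mergeHead_mergeHead]

theorem splitOn_comma (l : List Char) : PySem.Chars.splitOn l [','] = splitComma l := by
  unfold PySem.Chars.splitOn
  rw [go_spec l (l.length + 1) (by omega)]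
  simp [mergeHead_nil_of_ne (splitComma_ne_nil l)]

-- A's strip/filter/collect pass, as a function of the list of pieces.
def procPieces (ps : List (List Char)) : List String :=
  ((ps.map PySem.Chars.strip).filter (fun p => !p.isEmpty)).map (fun p => String.mk p)

theorem inner_foldl (ps : List (List Char)) (out : List String) :
    ps.foldl (fun out piece =>
        let p := PySem.Chars.strip piece
        if p.isEmpty then out else out ++ [String.mk p]) out
      = out ++ procPieces ps := by
  induction ps generalizing out with
  | nil => simp [procPieces]
  | cons piece ps ih =>
    simp only [List.foldl_cons, ih]
    by_cases h : (PySem.Chars.strip piece).isEmpty <;>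
      simp [procPieces, h]

theorem foldl_app {α β : Type} (l : List α) (f : α → List β) (out : List β) :
    l.foldl (fun o a => o ++ f a) out = out ++ l.flatMap f := by
  induction l generalizing out with
  | nil => simp
  | cons a l ih => simp [ih]

theorem A_char (vs : List String) :
    (expand_csv (some vs))
      = vs.flatMap (fun v => procPieces (splitComma v.toList)) := by
  by_cases hvs : vs = []
  · simp [expand_csv, hvs]
  · show (if vs = [] then [] else _) = _
    simp only [hvs, if_false]
    have hcomma : (",".toList) = [','] := rfl
    simp only [hcomma, splitOn_comma, inner_foldl]
    simpa using foldl_app vs (fun v => procPieces (splitComma v.toList)) []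

-- ===== B-side characterization =====

def emitTok (x : List Char) : List String := if x = [] then [] else [String.mk x]

def combine (buf pend p : List Char) : List Char :=
  if buf = [] then PySem.Chars.strip p else buf ++ PySem.Chars.rstrip (pend ++ p)

def tokensFrom (buf pend : List Char) : List (List Char) → List String
  | [] => []
  | p :: ps => emitTok (combine buf pend p) ++ procPieces ps

theorem procPieces_cons (p : List Char) (ps : List (List Char)) :
    procPieces (p :: ps) = emitTok (PySem.Chars.strip p) ++ procPieces ps := by
  by_cases h : PySem.Chars.strip p = [] <;>
    simp [procPieces, emitTok, h]

theorem tokensFrom_nil (ps : List (List Char)) :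
    tokensFrom [] [] ps = procPieces ps := by
  cases ps with
  | nil => simp [tokensFrom, procPieces]
  | cons p ps => simp [tokensFrom, combine, procPieces_cons]

theorem rstrip_all_ws {pend : List Char} (hp : pend.all PySem.Chars.isspace) :
    PySem.Chars.rstrip pend = [] := by
  unfold PySem.Chars.rstrip
  have : pend.reverse.all PySem.Chars.isspace := by simpa using hp
  rw [List.dropWhile_eq_nil_iff.mpr (fun x hx => by
    have := List.all_eq_true.mp this x hx; simpa using this)]
  rfl

theorem dropWhile_append_cons {p : Char → Bool} (u : List Char) (c : Char) (w : List Char)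
    (hc : p c = false) :
    List.dropWhile p (u ++ c :: w) = List.dropWhile p u ++ c :: w := by
  induction u with
  | nil => simp [List.dropWhile, hc]
  | cons a u ih =>
    by_cases ha : p a <;> simp [List.dropWhile, ha, ih]

theorem rstrip_append_cons (x : List Char) (c : Char) (y : List Char)
    (hc : PySem.Chars.isspace c = false) :
    PySem.Chars.rstrip (x ++ c :: y) = x ++ c :: PySem.Chars.rstrip y := by
  unfold PySem.Chars.rstrip
  have : (x ++ c :: y).reverse = y.reverse ++ c :: x.reverse := by simp
  rw [this, dropWhile_append_cons _ _ _ hc]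
  simp

theorem strip_cons_ws (c : Char) (p : List Char) (hc : PySem.Chars.isspace c = true) :
    PySem.Chars.strip (c :: p) = PySem.Chars.strip p := by
  simp [PySem.Chars.strip, PySem.Chars.lstrip, List.dropWhile, hc]

theorem strip_cons_nws (c : Char) (p : List Char) (hc : PySem.Chars.isspace c = false) :
    PySem.Chars.strip (c :: p) = c :: PySem.Chars.rstrip p := by
  simp only [PySem.Chars.strip, PySem.Chars.lstrip, List.dropWhile, hc]
  have := rstrip_append_cons [] c p hc
  simpa using this

-- Core invariant of B's scan: with all-whitespace pend (empty when buf is empty),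
-- running to the "," sentinel produces exactly the stripped non-empty tokens.
theorem scan_spec (l : List Char) (res : List String) (buf pend : List Char)
    (hp : pend.all PySem.Chars.isspace) (hb : buf = [] → pend = []) :
    (l ++ [',']).foldl pvStep (res, buf, pend)
      = (res ++ tokensFrom buf pend (splitComma l), [], []) := by
  induction l generalizing res buf pend with
  | nil =>
    simp only [List.nil_append, List.foldl_cons, List.foldl_nil, pvStep]
    by_cases hbuf : buf = []
    · simp [hbuf, tokensFrom, splitComma, combine, emitTok, procPieces, PySem.Chars.strip,
        PySem.Chars.lstrip, PySem.Chars.rstrip]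
    · simp [hbuf, tokensFrom, splitComma, combine, emitTok, procPieces, rstrip_all_ws hp]
  | cons c l ih =>
    by_cases hc : c = ','
    · subst hc
      have hstep : pvStep (res, buf, pend) ','
          = (if buf = [] then res else res ++ [String.mk buf], [], []) := by
        simp [pvStep]
      simp only [List.cons_append, List.foldl_cons, hstep]
      rw [ih _ [] [] (by simp) (fun _ => rfl), tokensFrom_nil]
      have hsc : splitComma (',' :: l) = [] :: splitComma l := by simp [splitComma]
      rw [hsc]
      simp only [tokensFrom]
      by_cases hbuf : buf = []
      · simp [hbuf, combine, emitTok, PySem.Chars.strip, PySem.Chars.lstrip,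
          PySem.Chars.rstrip]
      · simp [hbuf, combine, emitTok, rstrip_all_ws hp, List.append_assoc]
    · by_cases hws : PySem.Chars.isspace c = true
      · have hstep : pvStep (res, buf, pend) c
            = (res, buf, if buf = [] then pend else pend ++ [c]) := by
          simp [pvStep, hc, hws]
        simp only [List.cons_append, List.foldl_cons, hstep]
        by_cases hbuf : buf = []
        · rw [if_pos hbuf, ih _ buf pend hp hb]
          have hpe := hb hbuf
          subst hbuf; subst hpe
          obtain ⟨p, ps, hsp⟩ := List.exists_cons_of_ne_nil (splitComma_ne_nil l)
          have hsc : splitComma (c :: l) = (c :: p) :: ps := by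
            simp [splitComma, hc, hsp, mergeHead]
          rw [hsp, hsc]
          simp [tokensFrom, combine, strip_cons_ws c p hws]
        · rw [if_neg hbuf,
            ih _ buf (pend ++ [c]) (by simp [List.all_append, hp, hws]) (fun h => absurd h hbuf)]
          obtain ⟨p, ps, hsp⟩ := List.exists_cons_of_ne_nil (splitComma_ne_nil l)
          have hsc : splitComma (c :: l) = (c :: p) :: ps := by
            simp [splitComma, hc, hsp, mergeHead]
          rw [hsp, hsc]
          simp [tokensFrom, combine, hbuf, List.append_assoc]
      · have hws' : PySem.Chars.isspace c = false := by simpa using hws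
        have hstep : pvStep (res, buf, pend) c = (res, buf ++ pend ++ [c], []) := by
          simp [pvStep, hc, hws']
        simp only [List.cons_append, List.foldl_cons, hstep]
        rw [ih _ (buf ++ pend ++ [c]) [] (by simp) (by simp)]
        obtain ⟨p, ps, hsp⟩ := List.exists_cons_of_ne_nil (splitComma_ne_nil l)
        have hsc : splitComma (c :: l) = (c :: p) :: ps := by
          simp [splitComma, hc, hsp, mergeHead]
        rw [hsp, hsc]
        by_cases hbuf : buf = []
        · have hpe := hb hbuf
          subst hbuf; subst hpe
          simp [tokensFrom, combine, strip_cons_nws c p hws']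
        · have : PySem.Chars.rstrip (pend ++ c :: p)
              = pend ++ c :: PySem.Chars.rstrip p := rstrip_append_cons pend c p hws'
          simp [tokensFrom, combine, hbuf, this, List.append_assoc]

theorem B_char (vs : List String) :
    expand_csv_alt (some vs)
      = vs.flatMap (fun v => procPieces (splitComma v.toList)) := by
  show vs.foldl (fun res v => ((v.toList ++ [',']).foldl pvStep (res, [], [])).1) []
      = vs.flatMap (fun v => procPieces (splitComma v.toList))
  have h : ∀ (res : List String) (v : String),
      ((v.toList ++ [',']).foldl pvStep (res, [], [])).1
        = res ++ procPieces (splitComma v.toList) := by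
    intro res v
    rw [scan_spec v.toList res [] [] (by simp) (fun _ => rfl), tokensFrom_nil]
  have := foldl_app vs (fun v => procPieces (splitComma v.toList)) ([] : List String)
  simp only [List.nil_append] at this
  rw [← this]
  have hfun : (fun (res : List String) (v : String) =>
      ((v.toList ++ [',']).foldl pvStep (res, [], [])).1)
      = fun res v => res ++ procPieces (splitComma v.toList) := by
    funext res v; exact h res v
  rw [hfun]

-- ===== VERDICT (by name: the statement is the Claim_ definition above) =====
theorem expand_csv_spec : Claim_equal_expand_csv := by
  intro values _
  unfold Spec_expand_csv
  match values with
  | none => rfl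
  | some vs => rw [A_char, B_char]
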